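-- pv_equiv track=rewrite | github.com/AnnekeDeLange/BEDex_NEW | for/main.py | shortest_names
-- ===== SOURCE A (Python) =====
-- def shortest_names(names):
--     shortest_country = []
--     lengths = []
--     for c in names:
--         length_country = len(str(c))
--         lengths.append(length_country)
--     for c in names:
--         if len(str(c)) == min(lengths):
--             shortest_country.append(c)
--     return shortest_country
-- ===== SOURCE B (Python) =====
-- def shortest_names(names):
--     best = 0
--     result = []
--     for c in names:
--         l = len(str(c))
--         if not result or l < best:
--             best = l
--             result = [c]
--         elif l == best:
--             result.append(c)
--     return result
-- ===== Notes on version B (the rewrite author's own statement) =====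
-- stated objective: faster
-- what changed: Replaced the build-lengths-list-then-filter-with-repeated-min two-pass scheme by a single pass that maintains a running minimum length and an accumulator reset on a new minimum.
import Mathlib
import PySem

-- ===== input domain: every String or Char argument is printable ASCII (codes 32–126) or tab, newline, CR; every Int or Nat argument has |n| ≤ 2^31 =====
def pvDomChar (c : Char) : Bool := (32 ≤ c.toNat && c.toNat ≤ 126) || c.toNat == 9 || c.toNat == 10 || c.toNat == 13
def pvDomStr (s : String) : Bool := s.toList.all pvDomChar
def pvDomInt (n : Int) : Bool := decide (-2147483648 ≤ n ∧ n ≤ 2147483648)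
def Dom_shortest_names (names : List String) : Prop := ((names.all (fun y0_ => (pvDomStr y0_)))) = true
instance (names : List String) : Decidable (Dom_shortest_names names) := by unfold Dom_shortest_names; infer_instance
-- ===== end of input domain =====

-- B replaces A's two passes (build all lengths, then filter with min recomputed per element)
-- by one pass with a running minimum and a reset-on-improvement accumulator (faster).

-- ===== PORT A =====
-- literal port: first loop builds the lengths list, second loop appends c when len(c) == min(lengths)
def shortest_names (names : List String) : List String :=
  let lengths : List Int := names.foldl (fun ls c => ls ++ [PySem.Str.len c]) []
  names.foldl (fun acc c =>
    if some (PySem.Str.len c) = PySem.List.min? lengths (fun x => x) then acc ++ [c] else acc) []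

-- ===== PORT B =====
-- one iteration of B's loop: reset on a strictly smaller length, append on a tie
def pvStepB (st : Int × List String) (c : String) : Int × List String :=
  let l := PySem.Str.len c
  if st.2 = [] ∨ l < st.1 then (l, [c])
  else if l = st.1 then (st.1, st.2 ++ [c])
  else st

-- single pass over names with state (best, result)
def shortest_names_alt (names : List String) : List String :=
  (names.foldl pvStepB ((0 : Int), ([] : List String))).2

-- ===== PRECONDITION & SPEC =====
def Spec_shortest_names (names : List String) (out : List String) : Prop := out = shortest_names_alt names
instance (names : List String) (out : List String) : Decidable (Spec_shortest_names names out) := by unfold Spec_shortest_names; infer_instance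

-- ===== CLAIM (what is proved, stated in full; the proofs are below) =====
def Claim_equal_shortest_names : Prop := ∀ (names : List String), Dom_shortest_names names → Spec_shortest_names names (shortest_names names)

-- ===== LEMMAS AND PROOFS =====

-- loop invariant for B's fold: starting from a state holding a minimum b of the prefix's
-- lengths and the prefix's elements of that length, the fold produces the filter of the
-- whole list by its minimum length (expressed as a running foldl min over the rest).
theorem alt_fold_inv (rest : List String) : ∀ (pre : List String) (b : Int),
    (∀ c ∈ pre, b ≤ (c.length : Int)) →
    pre.filter (fun c => (c.length : Int) = b) ≠ [] →
    (rest.foldl pvStepB (b, pre.filter (fun c => (c.length : Int) = b))).2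
      = (pre ++ rest).filter
          (fun c => (c.length : Int) = (rest.map (fun c => (c.length : Int))).foldl min b) := by
  induction rest with
  | nil => intro pre b _ _; rw [List.foldl_nil, List.map_nil, List.foldl_nil, List.append_nil]
  | cons c rest ih =>
    intro pre b hle hne
    have hlc : PySem.Str.len c = (c.length : Int) := rfl
    simp only [List.foldl_cons, List.map_cons]
    by_cases hlt : (c.length : Int) < b
    · -- strictly smaller: reset
      have hstep : pvStepB (b, pre.filter (fun x => (x.length : Int) = b)) c
          = ((c.length : Int), [c]) := by
        simp only [pvStepB, hlc]
        rw [if_pos (Or.inr hlt)]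
      have h1 : (pre ++ [c]).filter (fun x => (x.length : Int) = (c.length : Int)) = [c] := by
        rw [List.filter_append]
        have h0 : pre.filter (fun x => (x.length : Int) = (c.length : Int)) = [] := by
          apply List.filter_eq_nil_iff.mpr
          intro x hx
          have hx' := hle x hx
          have hne2 : (x.length : Int) ≠ (c.length : Int) := by omega
          simpa using hne2
        rw [h0]
        simp
      have hle' : ∀ x ∈ pre ++ [c], (c.length : Int) ≤ (x.length : Int) := by
        intro x hx
        rcases List.mem_append.mp hx with h | h
        · have := hle x h; omega
        · simp at h; subst h; omega
      have hne' : (pre ++ [c]).filter (fun x => (x.length : Int) = (c.length : Int)) ≠ [] := by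
        rw [h1]; simp
      have key := ih (pre ++ [c]) ((c.length : Int)) hle' hne'
      rw [h1] at key
      rw [hstep, key]
      have hmin : min b ((c.length : Int)) = (c.length : Int) := by omega
      simp only [hmin]
      simp [List.append_assoc]
    · by_cases heq : (c.length : Int) = b
      · -- tie: append
        have hstep : pvStepB (b, pre.filter (fun x => (x.length : Int) = b)) c
            = (b, pre.filter (fun x => (x.length : Int) = b) ++ [c]) := by
          simp only [pvStepB, hlc]
          rw [if_neg (by push Not; exact ⟨hne, not_lt.mp hlt⟩), if_pos heq]
        have h1 : pre.filter (fun x => (x.length : Int) = b) ++ [c]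
            = (pre ++ [c]).filter (fun x => (x.length : Int) = b) := by
          rw [List.filter_append]; simp [heq]
        have hle' : ∀ x ∈ pre ++ [c], b ≤ (x.length : Int) := by
          intro x hx
          rcases List.mem_append.mp hx with h | h
          · exact hle x h
          · simp at h; subst h; omega
        have hne' : (pre ++ [c]).filter (fun x => (x.length : Int) = b) ≠ [] := by
          rw [← h1]; simp
        have key := ih (pre ++ [c]) b hle' hne'
        rw [hstep, h1, key]
        have hmin : min b ((c.length : Int)) = b := by omega
        simp only [hmin]
        simp [List.append_assoc]
      · -- strictly larger: unchanged
        have hstep : pvStepB (b, pre.filter (fun x => (x.length : Int) = b)) c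
            = (b, pre.filter (fun x => (x.length : Int) = b)) := by
          simp only [pvStepB, hlc]
          rw [if_neg (by push Not; exact ⟨hne, not_lt.mp hlt⟩), if_neg heq]
        have h1 : pre.filter (fun x => (x.length : Int) = b)
            = (pre ++ [c]).filter (fun x => (x.length : Int) = b) := by
          rw [List.filter_append]; simp [heq]
        have hle' : ∀ x ∈ pre ++ [c], b ≤ (x.length : Int) := by
          intro x hx
          rcases List.mem_append.mp hx with h | h
          · exact hle x h
          · simp at h; subst h; omega
        have hne' : (pre ++ [c]).filter (fun x => (x.length : Int) = b) ≠ [] := by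
          rw [← h1]; exact hne
        have key := ih (pre ++ [c]) b hle' hne'
        rw [hstep, h1, key]
        have hmin : min b ((c.length : Int)) = b := by omega
        simp only [hmin]
        simp [List.append_assoc]

theorem shortest_names_spec : Claim_equal_shortest_names := by
  unfold Claim_equal_shortest_names
  intro names _
  unfold Spec_shortest_names shortest_names shortest_names_alt
  cases names with
  | nil => simp
  | cons n t =>
    -- A's side: lengths list = map, min? on a cons, fold = filter
    rw [PySem.List.foldl_append_singleton_eq_map]
    simp only [List.nil_append, List.map_cons, PySem.List.min?_id_cons]
    rw [PySem.List.foldl_append_ite_eq_filter]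
    -- B's side: first step initialises the state, then the invariant applies
    have hstep0 : pvStepB ((0 : Int), ([] : List String)) n = ((n.length : Int), [n]) := by
      simp [pvStepB]
    have h0 : ([n].filter (fun c => (c.length : Int) = (n.length : Int))) = [n] := by simp
    have key := alt_fold_inv t [n] ((n.length : Int))
      (by intro x hx; simp at hx; subst hx; omega) (by rw [h0]; simp)
    rw [h0] at key
    simp only [List.foldl_cons, hstep0]
    rw [key]
    have hfun : List.map PySem.Str.len t = List.map (fun c : String => (c.length : Int)) t := by
      simp [PySem.Str.len_eq]
    rw [hfun]
    simp [PySem.Str.len_eq]
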